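-- pv_equiv track=rewrite | github.com/broersma/thesis-gspimplementation | gsp/check_candidates.py | create_alt
-- ===== SOURCE A (Python) =====
-- def create_alt(data_sequence):
--
--     # make an alternative representation of data_sequence
--     alt_data_sequence = dict()
--     for time, element in data_sequence:
--         for item in element:
--             if item not in alt_data_sequence:
--                 alt_data_sequence[item] = list()
--             alt_data_sequence[item].append(time)
--     # sort the times for each item
--     alt_data_sequence = {item: sorted(alt_data_sequence[item]) for item in alt_data_sequence}
--     return alt_data_sequence
-- ===== SOURCE B (Python) =====
-- def create_alt(data_sequence):
--     # One global stable sort by time instead of per-item sorts: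
--     # collect (item, time) pairs (registering each item once, in first-appearance
--     # order, so the dict's key order matches), sort the pairs by time only, then
--     # distribute the times in one pass -- every list comes out already sorted.
--     pairs = []
--     result = {}
--     for time, element in data_sequence:
--         for item in element:
--             result.setdefault(item, [])
--             pairs.append((item, time))
--     pairs.sort(key=lambda p: p[1])
--     for item, time in pairs:
--         result[item].append(time)
--     return result
-- ===== Notes on version B (the rewrite author's own statement) =====
-- stated objective: alternative
-- what changed: Instead of grouping times per item and then calling sorted() once per item, B collects all (item, time) pairs, sorts them once globally by time only, and distributes the times in a single pass so every per-item list is emitted already in ascending order.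
import Mathlib
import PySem

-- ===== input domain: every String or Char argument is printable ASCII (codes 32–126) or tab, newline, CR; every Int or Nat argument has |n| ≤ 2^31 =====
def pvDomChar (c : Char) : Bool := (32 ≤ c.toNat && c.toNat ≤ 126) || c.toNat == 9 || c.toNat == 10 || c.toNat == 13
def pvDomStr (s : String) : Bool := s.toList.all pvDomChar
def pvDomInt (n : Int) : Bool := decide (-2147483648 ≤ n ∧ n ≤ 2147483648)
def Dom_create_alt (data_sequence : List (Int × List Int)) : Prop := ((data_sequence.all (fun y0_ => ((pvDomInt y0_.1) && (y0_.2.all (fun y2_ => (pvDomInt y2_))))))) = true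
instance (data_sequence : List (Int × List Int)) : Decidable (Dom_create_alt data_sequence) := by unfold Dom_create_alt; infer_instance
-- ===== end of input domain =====

-- B replaces A's per-item sorted() calls with one global stable sort of all
-- (item, time) pairs keyed on time plus a single distribution pass (alternative
-- decomposition; same asymptotic cost).


-- ===== PORT A =====
-- 'alt_data_sequence[item]' in the final comprehension is ported as getD _ []; the key
-- is always present (the loop iterates the dict's own keys), so this is exact.
def create_alt (data_sequence : List (Int × List Int)) : List (Int × List Int) :=
  let d := data_sequence.foldl (fun d te =>
    te.2.foldl (fun d item =>
      (if d.contains item then d else d.insert item ([] : List Int)).modify item []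
        (fun v => v ++ [te.1])) d) PySem.Dict.empty
  (d.keys.foldl (fun d2 k =>
      d2.insert k (PySem.List.sorted (d.getD k []) (fun x => x) false)) PySem.Dict.empty).items

-- ===== PORT B =====
def create_alt_alt (data_sequence : List (Int × List Int)) : List (Int × List Int) :=
  let s := data_sequence.foldl (fun (s : List (Int × Int) × PySem.Dict Int (List Int)) te =>
    te.2.foldl (fun s item => (s.1 ++ [(item, te.1)], s.2.setdefault item [])) s)
    ([], PySem.Dict.empty)
  let sp := PySem.List.sorted s.1 (fun p => p.2) false
  (sp.foldl (fun d p => d.modify p.1 [] (fun v => v ++ [p.2])) s.2).items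

-- ===== PRECONDITION & SPEC =====
def Spec_create_alt (data_sequence : List (Int × List Int)) (out : List (Int × List Int)) : Prop := out = create_alt_alt data_sequence
instance (data_sequence : List (Int × List Int)) (out : List (Int × List Int)) : Decidable (Spec_create_alt data_sequence out) := by unfold Spec_create_alt; infer_instance

-- ===== CLAIM (what is proved, stated in full; the proofs are below) =====
def Claim_equal_create_alt : Prop := ∀ (data_sequence : List (Int × List Int)), Dom_create_alt data_sequence → Spec_create_alt data_sequence (create_alt data_sequence)

-- ===== LEMMAS AND PROOFS =====

-- all (item, time) pairs, in traversal order
def flatPairs (ds : List (Int × List Int)) : List (Int × Int) :=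
  ds.flatMap (fun te => te.2.map (fun item => (item, te.1)))

-- the nested for-loops over data_sequence are one fold over flatPairs
theorem foldl_nested_eq_flat {σ : Type} (g : σ → (Int × Int) → σ) (ds : List (Int × List Int))
    (init : σ) :
    ds.foldl (fun s te => te.2.foldl (fun s item => g s (item, te.1)) s) init
      = (flatPairs ds).foldl g init := by
  induction ds generalizing init with
  | nil => rfl
  | cons te t ih =>
    simp only [List.foldl_cons, flatPairs, List.flatMap_cons, List.foldl_append, List.foldl_map]
    exact ih _

-- A's first phase, rewritten as a fold over flatPairs in setdefault form
theorem a_phase1_eq (ds : List (Int × List Int)) :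
    ds.foldl (fun d te =>
        te.2.foldl (fun d item =>
          (if d.contains item then d else d.insert item ([] : List Int)).modify item []
            (fun v => v ++ [te.1])) d) PySem.Dict.empty
      = (flatPairs ds).foldl
          (fun d p => (d.setdefault p.1 []).modify p.1 [] (fun v => v ++ [p.2]))
          PySem.Dict.empty := by
  have h := foldl_nested_eq_flat
    (fun (d : PySem.Dict Int (List Int)) (p : Int × Int) =>
      (if d.contains p.1 then d else d.insert p.1 ([] : List Int)).modify p.1 []
        (fun v => v ++ [p.2])) ds PySem.Dict.empty
  refine h.trans (PySem.List.foldl_congr_mem _ _ _ _ ?_)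
  intro d p _
  cases hc : d.contains p.1 with
  | true => rw [PySem.Dict.setdefault_of_contains _ _ hc]; simp
  | false => rw [PySem.Dict.setdefault_of_not_contains _ _ hc]; simp

-- B's first phase: the pair list is flatPairs, the dict is the setdefault fold
theorem b_phase1_eq (ds : List (Int × List Int)) :
    ds.foldl (fun (s : List (Int × Int) × PySem.Dict Int (List Int)) te =>
        te.2.foldl (fun s item => (s.1 ++ [(item, te.1)], s.2.setdefault item [])) s)
      ([], PySem.Dict.empty)
      = (flatPairs ds,
         (flatPairs ds).foldl (fun d p => d.setdefault p.1 []) PySem.Dict.empty) := by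
  have h := foldl_nested_eq_flat
    (fun (s : List (Int × Int) × PySem.Dict Int (List Int)) (p : Int × Int) =>
      (s.1 ++ [p], s.2.setdefault p.1 [])) ds ([], PySem.Dict.empty)
  refine h.trans ?_
  rw [PySem.List.foldl_prod_mk (f := fun acc (p : Int × Int) => acc ++ [p])
    (g := fun (d : PySem.Dict Int (List Int)) (p : Int × Int) => d.setdefault p.1 [])]
  rw [PySem.List.foldl_append_singleton_eq_self, List.nil_append]

-- one step of either first-phase loop adds the item to the key set
theorem keys_sdm_step (d : PySem.Dict Int (List Int)) (p : Int × Int)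
    (f : List Int → List Int) :
    ((d.setdefault p.1 []).modify p.1 [] f).keys = PySem.Set.add d.keys p.1 := by
  cases hc : d.contains p.1 with
  | true =>
    rw [PySem.Dict.setdefault_of_contains _ _ hc, PySem.Dict.keys_modify,
      PySem.Dict.keys_insert_of_contains _ _ hc]
    simp [PySem.Set.add, PySem.Set.contains, (PySem.Dict.contains_iff_mem_keys d p.1).mp hc]
  | false =>
    rw [PySem.Dict.setdefault_of_not_contains _ _ hc, PySem.Dict.keys_modify,
      PySem.Dict.keys_insert_of_contains _ _ (PySem.Dict.contains_insert_self d p.1 []),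
      PySem.Dict.keys_insert_of_not_contains _ _ hc]
    have : p.1 ∉ d.keys := fun hm =>
      absurd ((PySem.Dict.contains_iff_mem_keys d p.1).mpr hm) (by simp [hc])
    simp [PySem.Set.add, PySem.Set.contains, this]

theorem keys_sd_step (d : PySem.Dict Int (List Int)) (p : Int × Int) :
    (d.setdefault p.1 ([] : List Int)).keys = PySem.Set.add d.keys p.1 := by
  rw [PySem.Dict.keys_setdefault]
  cases hc : d.contains p.1 with
  | true =>
    simp [PySem.Set.add, PySem.Set.contains, (PySem.Dict.contains_iff_mem_keys d p.1).mp hc]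
  | false =>
    have : p.1 ∉ d.keys := fun hm =>
      absurd ((PySem.Dict.contains_iff_mem_keys d p.1).mpr hm) (by simp [hc])
    simp [PySem.Set.add, PySem.Set.contains, this]

-- keys of A's first phase
theorem keys_foldl_sdm (l : List (Int × Int)) (d : PySem.Dict Int (List Int)) :
    (l.foldl (fun d p => (d.setdefault p.1 []).modify p.1 [] (fun v => v ++ [p.2])) d).keys
      = PySem.Set.update d.keys (l.map (·.1)) := by
  induction l generalizing d with
  | nil => rfl
  | cons p t ih =>
    rw [List.foldl_cons, ih, keys_sdm_step, List.map_cons]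
    simp [PySem.Set.update]

-- keys of B's registration dict
theorem keys_foldl_sd (l : List (Int × Int)) (d : PySem.Dict Int (List Int)) :
    (l.foldl (fun d p => d.setdefault p.1 []) d).keys
      = PySem.Set.update d.keys (l.map (·.1)) := by
  induction l generalizing d with
  | nil => rfl
  | cons p t ih =>
    rw [List.foldl_cons, ih, keys_sd_step, List.map_cons]
    simp [PySem.Set.update]

-- the grouping value computed by A's first phase
theorem getD_foldl_sdm (l : List (Int × Int)) (d : PySem.Dict Int (List Int)) (c : Int) :
    (l.foldl (fun d p => (d.setdefault p.1 []).modify p.1 [] (fun v => v ++ [p.2])) d).getD c []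
      = d.getD c [] ++ (l.filter (fun p => p.1 == c)).map (·.2) := by
  induction l generalizing d with
  | nil => simp
  | cons p t ih =>
    rw [List.foldl_cons, ih]
    by_cases hc : c = p.1
    · subst hc
      simp [PySem.Dict.getD_setdefault_self]
    · rw [PySem.Dict.getD_modify]
      simp only [if_neg hc]
      rw [PySem.Dict.getD_eq_get?_getD, PySem.Dict.get?_setdefault_of_ne _ _ hc,
        ← PySem.Dict.getD_eq_get?_getD]
      simp [Ne.symm hc]

-- B's registration dict stores [] at every key
theorem getD_foldl_sd (l : List (Int × Int)) (d : PySem.Dict Int (List Int)) (c : Int) :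
    (l.foldl (fun d p => d.setdefault p.1 []) d).getD c [] = d.getD c [] := by
  induction l generalizing d with
  | nil => rfl
  | cons p t ih =>
    rw [List.foldl_cons, ih]
    by_cases hc : c = p.1
    · subst hc; rw [PySem.Dict.getD_setdefault_self]
    · rw [PySem.Dict.getD_eq_get?_getD, PySem.Dict.get?_setdefault_of_ne _ _ hc,
        ← PySem.Dict.getD_eq_get?_getD]

-- adding already-present elements to a set is a no-op
theorem set_update_of_subset (s : PySem.Set Int) (l : List Int) (h : ∀ x ∈ l, x ∈ s) :
    PySem.Set.update s l = s := by
  induction l generalizing s with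
  | nil => rfl
  | cons x t ih =>
    have hx : PySem.Set.add s x = s := by
      simp [PySem.Set.add, PySem.Set.contains, h x (by simp)]
    simp only [PySem.Set.update, List.foldl_cons]
    have := ih (PySem.Set.add s x) (fun y hy => by rw [hx]; exact h y (by simp [hy]))
    simpa [PySem.Set.update, hx] using this

-- the heart: one global stable sort by time, then filtering by item, yields each
-- item's sorted time list
theorem sorted_filter_eq (flat : List (Int × Int)) (k : Int) :
    PySem.List.sorted ((flat.filter (fun p => p.1 == k)).map (·.2)) (fun x => x) false
      = ((PySem.List.sorted flat (fun p => p.2) false).filter (fun p => p.1 == k)).map (·.2) := by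
  apply PySem.List.sorted_id_eq_of_perm_of_pairwise
  · exact ((PySem.List.sorted_perm flat (fun p => p.2) false).filter _).map _
  · rw [List.pairwise_map]
    exact List.Pairwise.sublist List.filter_sublist
      (PySem.List.sorted_pairwise flat (fun p => p.2))

-- ===== VERDICT (by name: the statement is the Claim_ definition above) =====
theorem create_alt_spec : Claim_equal_create_alt := by
  intro ds _
  unfold Spec_create_alt create_alt create_alt_alt
  simp only
  rw [a_phase1_eq, b_phase1_eq]
  simp only
  set flat := flatPairs ds with hflat
  set dA := flat.foldl (fun d p => (d.setdefault p.1 []).modify p.1 [] (fun v => v ++ [p.2]))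
      PySem.Dict.empty with hdA
  set d0 := flat.foldl (fun d p => d.setdefault p.1 []) PySem.Dict.empty with hd0
  set sp := PySem.List.sorted flat (fun p => p.2) false with hsp
  set dB := sp.foldl (fun d p => d.modify p.1 [] (fun v => v ++ [p.2])) d0 with hdB
  -- key lists
  have hkA : dA.keys = PySem.Set.update ([] : PySem.Set Int) (flat.map (·.1)) := by
    rw [hdA, keys_foldl_sdm]; rfl
  have hk0 : d0.keys = PySem.Set.update ([] : PySem.Set Int) (flat.map (·.1)) := by
    rw [hd0, keys_foldl_sd]; rfl
  have hofL : PySem.Set.update ([] : PySem.Set Int) (flat.map (·.1))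
      = PySem.Set.ofList (flat.map (·.1)) := rfl
  have hkB : dB.keys = d0.keys := by
    rw [hdB, PySem.Dict.keys_foldl_modify_key sp (fun p => p.1) []
      (fun _ p => fun v => v ++ [p.2]) d0]
    apply set_update_of_subset
    intro x hx
    rw [hk0, hofL, PySem.Set.mem_ofList]
    obtain ⟨p, hp, rfl⟩ := List.mem_map.mp hx
    exact List.mem_map_of_mem ((PySem.List.sorted_perm flat (fun p => p.2) false).mem_iff.mp hp)
  have hnd0 : d0.keys.Nodup := by rw [hk0, hofL]; exact PySem.Set.nodup_ofList _
  have hndA : dA.keys.Nodup := by rw [hkA, ← hk0]; exact hnd0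
  have hndB : dB.keys.Nodup := by rw [hkB]; exact hnd0
  -- A's second phase (the dict comprehension) lists the keys in order
  rw [PySem.Dict.items_foldl_insert_fresh dA.keys (fun k => k)
        (fun k => PySem.List.sorted (dA.getD k []) (fun x => x) false) PySem.Dict.empty
        (fun a _ => PySem.Dict.contains_empty a) (by simpa using hndA),
      PySem.Dict.items_eq_map_keys dB hndB []]
  rw [hkB, hkA, ← hk0]
  have hempty : (PySem.Dict.empty : PySem.Dict Int (List Int)).items = [] := rfl
  rw [hempty, List.nil_append]
  apply List.map_congr_left
  intro k _
  have hvA : dA.getD k [] = (flat.filter (fun p => p.1 == k)).map (·.2) := by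
    rw [hdA, getD_foldl_sdm]; simp
  have hvB : dB.getD k [] = (sp.filter (fun p => p.1 == k)).map (·.2) := by
    rw [hdB, PySem.Dict.getD_foldl_modify_append, getD_foldl_sd]; simp
  rw [hvA, hvB, hsp, sorted_filter_eq]
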